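-- pv_equiv track=rewrite | github.com/bbaserdem/lapack | examples/analyze_dependencies.py | analyze_call_chains
-- ===== SOURCE A (Python) =====
-- def analyze_call_chains(routine_name, calls_to, max_depth=5):
--     """Find all call chains starting from a routine."""
--     chains = []
--
--     def traverse(current, path, depth):
--         if depth >= max_depth:
--             return
--
--         if current in calls_to:
--             for called in calls_to[current]:
--                 if called not in path:  # Avoid cycles
--                     new_path = path + [called]
--                     chains.append(new_path)
--                     traverse(called, new_path, depth + 1)
--
--     traverse(routine_name, [routine_name], 0)
--     return chains
-- ===== SOURCE B (Python) =====
-- def analyze_call_chains(routine_name, calls_to, max_depth=5):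
--     """Find all call chains starting from a routine (iterative DFS with an explicit stack)."""
--     chains = []
--     stack = [(routine_name, [routine_name], 0)]
--     while stack:
--         node, path, depth = stack.pop()
--         if len(path) > 1:
--             chains.append(path)
--         if depth < max_depth and node in calls_to:
--             for child in reversed(calls_to[node]):
--                 if child not in path:
--                     stack.append((child, path + [child], depth + 1))
--     return chains
-- ===== Notes on version B (the rewrite author's own statement) =====
-- stated objective: alternative
-- what changed: Replaced A's nested recursive traverse() with an iterative depth-first search over an explicit LIFO stack of (node, path, depth) frames, pushing children in reversed order and emitting each chain when its frame is popped, which reproduces A's preorder chain list without recursion.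
import Mathlib
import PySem

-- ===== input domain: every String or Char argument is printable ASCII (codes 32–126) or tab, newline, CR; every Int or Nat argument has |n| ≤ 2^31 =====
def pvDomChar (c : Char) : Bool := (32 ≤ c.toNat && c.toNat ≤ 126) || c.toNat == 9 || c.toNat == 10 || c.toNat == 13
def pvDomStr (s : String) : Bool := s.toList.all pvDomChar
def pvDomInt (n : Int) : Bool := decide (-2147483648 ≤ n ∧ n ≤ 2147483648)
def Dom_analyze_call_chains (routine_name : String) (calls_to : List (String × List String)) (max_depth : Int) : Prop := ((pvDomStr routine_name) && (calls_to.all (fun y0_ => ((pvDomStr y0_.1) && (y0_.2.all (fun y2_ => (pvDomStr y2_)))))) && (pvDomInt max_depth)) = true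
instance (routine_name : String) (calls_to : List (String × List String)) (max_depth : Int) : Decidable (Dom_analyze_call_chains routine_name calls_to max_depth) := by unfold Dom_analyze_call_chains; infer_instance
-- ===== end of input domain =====

-- B replaces A's nested recursive `traverse` with an iterative DFS over an explicit
-- LIFO stack of (node, path, depth) frames (children pushed in reversed order, chain
-- emitted at pop time), producing exactly A's preorder chain list. Objective: alternative.

-- ===== PORT A =====
-- A's inner recursive `traverse`, returning the chains it appends.
-- (pvGoA carries the proof `depth < max_depth` only for termination; it is A's `for called in calls_to[current]` loop.)
mutual
def pvTravA (calls_to : List (String × List String)) (max_depth : Int)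
    (current : String) (path : List String) (depth : Int) : List (List String) :=
  if _h : max_depth ≤ depth then []
  else
    match (PySem.Dict.mk calls_to).get? current with
    | none => []
    | some children => pvGoA calls_to max_depth path depth (by omega) children []
  termination_by ((max_depth - depth).toNat, 1, 0)
  decreasing_by
    · exact Prod.Lex.right _ (Prod.Lex.left _ _ (by omega))

def pvGoA (calls_to : List (String × List String)) (max_depth : Int)
    (path : List String) (depth : Int) (_h : depth < max_depth)
    (children : List String) (acc : List (List String)) : List (List String) :=
  match children with
  | [] => acc
  | called :: rest =>
    if called ∈ path then pvGoA calls_to max_depth path depth _h rest acc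
    else pvGoA calls_to max_depth path depth _h rest
      (acc ++ [path ++ [called]] ++ pvTravA calls_to max_depth called (path ++ [called]) (depth + 1))
  termination_by ((max_depth - depth).toNat, 0, children.length)
  decreasing_by
    · exact Prod.Lex.right _ (Prod.Lex.right _ (by simp))
    · exact Prod.Lex.left _ _ (by omega)
    · exact Prod.Lex.right _ (Prod.Lex.right _ (by simp))
end

def analyze_call_chains (routine_name : String) (calls_to : List (String × List String)) (max_depth : Int) : List (List String) :=
  pvTravA calls_to max_depth routine_name [routine_name] 0

-- ===== PORT B =====
-- B's `for child in reversed(calls_to[node]): if child not in path: stack.append(...)`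
def pvPush (path : List String) (depth : Int) :
    List String → List (String × List String × Int) → List (String × List String × Int)
  | [], st => st
  | c :: cs, st => pvPush path depth cs (if c ∈ path then st else (c, path ++ [c], depth + 1) :: st)

-- B's `if node in calls_to:` guard around the push loop
def pvStep (calls_to : List (String × List String)) (path : List String) (depth : Int)
    (node : String) (rest : List (String × List String × Int)) : List (String × List String × Int) :=
  match (PySem.Dict.mk calls_to).get? node with
  | some children => pvPush path depth children.reverse rest
  | none => rest

-- largest children list in calls_to (used only in the termination measure of pvLoopB)
def pvMaxLen (calls_to : List (String × List String)) : Nat :=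
  calls_to.foldr (fun p m => max p.2.length m) 0

theorem pvPush_eq (path : List String) (depth : Int) (l : List String)
    (st : List (String × List String × Int)) :
    pvPush path depth l st =
      ((l.filter (fun c => !decide (c ∈ path))).reverse.map
        (fun c => (c, path ++ [c], depth + 1))) ++ st := by
  induction l generalizing st with
  | nil => simp [pvPush]
  | cons c cs ih =>
    by_cases hc : c ∈ path <;> simp [pvPush, hc, ih]

theorem pvLen_le (calls_to : List (String × List String)) (node : String) (children : List String)
    (h : (PySem.Dict.mk calls_to).get? node = some children) :
    children.length ≤ pvMaxLen calls_to := by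
  induction calls_to with
  | nil => simp [PySem.Dict.get?] at h
  | cons p rest ih =>
    rw [show (p :: rest : List (String × List String)) = (p.1, p.2) :: rest from rfl,
      PySem.Dict.get?_mk_cons] at h
    by_cases hk : (p.1 == node) = true
    · simp [hk] at h
      subst h
      simp [pvMaxLen]
    · simp [hk] at h
      have := ih h
      simp [pvMaxLen] at this ⊢
      omega

-- the termination measure of pvLoopB strictly drops at each iteration
theorem pvStep_sum_lt (calls_to : List (String × List String)) (max_depth : Int)
    (path : List String) (depth : Int) (node : String)
    (rest : List (String × List String × Int)) (hd : depth < max_depth) :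
    ((pvStep calls_to path depth node rest).map
        (fun f => (pvMaxLen calls_to + 1) ^ ((max_depth - f.2.2).toNat))).sum
      < (pvMaxLen calls_to + 1) ^ ((max_depth - depth).toNat)
        + (rest.map (fun f => (pvMaxLen calls_to + 1) ^ ((max_depth - f.2.2).toNat))).sum := by
  set C := pvMaxLen calls_to + 1 with hC
  have hCpos : 0 < C := by omega
  cases hm : (PySem.Dict.mk calls_to).get? node with
  | none =>
    simp only [pvStep, hm]
    have : 0 < C ^ ((max_depth - depth).toNat) := Nat.pow_pos hCpos
    omega
  | some children =>
    simp only [pvStep, hm]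
    rw [pvPush_eq]
    simp only [List.map_append, List.sum_append, List.map_map]
    set L := (children.reverse.filter (fun c => !decide (c ∈ path))).reverse with hL
    have hlen : L.length ≤ pvMaxLen calls_to := by
      have h1 := List.length_filter_le (fun c => !decide (c ∈ path)) children.reverse
      have h2 := pvLen_le calls_to node children hm
      simp [hL] at h1 ⊢
      simp at h2
      omega
    have hconst : (L.map ((fun f => C ^ ((max_depth - f.2.2).toNat)) ∘
        (fun c => (c, path ++ [c], depth + 1)))).sum
        = L.length * C ^ ((max_depth - (depth + 1)).toNat) := by
      induction L with
      | nil => simp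
      | cons x xs ihx => simp [ihx]; ring
    rw [hconst]
    have hpow : 0 < C ^ ((max_depth - (depth + 1)).toNat) := Nat.pow_pos hCpos
    have h1 : L.length * C ^ ((max_depth - (depth + 1)).toNat)
        < C * C ^ ((max_depth - (depth + 1)).toNat) :=
      Nat.mul_lt_mul_of_lt_of_le (by omega) (Nat.le_refl _) hpow
    have h2 : C * C ^ ((max_depth - (depth + 1)).toNat) = C ^ ((max_depth - depth).toNat) := by
      rw [← pow_succ']
      congr 1
      omega
    omega

-- B's while-loop over the explicit stack
def pvLoopB (calls_to : List (String × List String)) (max_depth : Int)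
    (stack : List (String × List String × Int)) (chains : List (List String)) : List (List String) :=
  match stack with
  | [] => chains
  | (node, path, depth) :: rest =>
    if hd : depth < max_depth then
      pvLoopB calls_to max_depth (pvStep calls_to path depth node rest)
        (if 1 < path.length then chains ++ [path] else chains)
    else
      pvLoopB calls_to max_depth rest
        (if 1 < path.length then chains ++ [path] else chains)
termination_by
  (stack.map (fun f => (pvMaxLen calls_to + 1) ^ ((max_depth - f.2.2).toNat))).sum
decreasing_by
  · simpa using pvStep_sum_lt calls_to max_depth path depth node rest hd
  · have : 0 < (pvMaxLen calls_to + 1) ^ ((max_depth - depth).toNat) :=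
      Nat.pow_pos (by omega)
    simp only [List.map_cons, List.sum_cons]
    omega

def analyze_call_chains_alt (routine_name : String) (calls_to : List (String × List String)) (max_depth : Int) : List (List String) :=
  pvLoopB calls_to max_depth [(routine_name, [routine_name], 0)] []

-- ===== PRECONDITION & SPEC =====
def Spec_analyze_call_chains (routine_name : String) (calls_to : List (String × List String)) (max_depth : Int) (out : List (List String)) : Prop := out = analyze_call_chains_alt routine_name calls_to max_depth
instance (routine_name : String) (calls_to : List (String × List String)) (max_depth : Int) (out : List (List String)) : Decidable (Spec_analyze_call_chains routine_name calls_to max_depth out) := by unfold Spec_analyze_call_chains; infer_instance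

-- ===== CLAIM (what is proved, stated in full; the proofs are below) =====
def Claim_equal_analyze_call_chains : Prop := ∀ (routine_name : String) (calls_to : List (String × List String)) (max_depth : Int), Dom_analyze_call_chains routine_name calls_to max_depth → Spec_analyze_call_chains routine_name calls_to max_depth (analyze_call_chains routine_name calls_to max_depth)

-- ===== LEMMAS AND PROOFS =====

-- what one frame contributes: its own chain (unless it is the root) plus all chains below it
def pvG (calls_to : List (String × List String)) (max_depth : Int)
    (f : String × List String × Int) : List (List String) :=
  (if 1 < f.2.1.length then [f.2.1] else []) ++ pvTravA calls_to max_depth f.1 f.2.1 f.2.2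

theorem pvGoA_acc (calls_to : List (String × List String)) (max_depth : Int)
    (path : List String) (depth : Int) (h : depth < max_depth)
    (children : List String) (acc : List (List String)) :
    pvGoA calls_to max_depth path depth h children acc
      = acc ++ pvGoA calls_to max_depth path depth h children [] := by
  induction children generalizing acc with
  | nil => rw [pvGoA, pvGoA]; simp
  | cons c cs ih =>
    rw [pvGoA, pvGoA]
    split_ifs with hc
    · exact ih acc
    · rw [ih, ih ([] ++ [path ++ [c]] ++ pvTravA calls_to max_depth c (path ++ [c]) (depth + 1))]
      simp

theorem pvGoA_flatten (calls_to : List (String × List String)) (max_depth : Int)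
    (path : List String) (depth : Int) (h : depth < max_depth)
    (children : List String) :
    pvGoA calls_to max_depth path depth h children []
      = ((children.filter (fun c => !decide (c ∈ path))).map
          (fun c => (path ++ [c]) :: pvTravA calls_to max_depth c (path ++ [c]) (depth + 1))).flatten := by
  induction children with
  | nil => rw [pvGoA]; simp
  | cons c cs ih =>
    rw [pvGoA]
    split_ifs with hc
    · simp [hc, ih]
    · rw [pvGoA_acc]
      simp [hc, ih]

theorem pvLoopB_eq (calls_to : List (String × List String)) (max_depth : Int)
    (stack : List (String × List String × Int)) (chains : List (List String))
    (hne : ∀ f ∈ stack, f.2.1 ≠ []) :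
    pvLoopB calls_to max_depth stack chains
      = chains ++ (stack.map (pvG calls_to max_depth)).flatten := by
  induction stack, chains using pvLoopB.induct calls_to max_depth with
  | case1 chains => rw [pvLoopB]; simp
  | case2 chains node path depth rest hd ih =>
    have hpath : path ≠ [] := hne (node, path, depth) (by simp)
    rw [pvLoopB]
    simp only [dif_pos hd]
    simp only [dite_eq_ite] at ih
    rw [ih]
    · cases hm : (PySem.Dict.mk calls_to).get? node with
      | some children =>
        have hstep : ((pvStep calls_to path depth node rest).map
            (pvG calls_to max_depth)).flatten
            = pvGoA calls_to max_depth path depth hd children []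
              ++ (rest.map (pvG calls_to max_depth)).flatten := by
          simp only [pvStep, hm]
          rw [pvPush_eq, pvGoA_flatten]
          simp only [List.map_append, List.flatten_append, List.filter_reverse,
            List.reverse_reverse, List.map_map]
          congr 2
          apply List.map_congr_left
          intro c _
          simp [pvG, List.length_pos_of_ne_nil hpath]
        rw [hstep]
        have htrav : pvTravA calls_to max_depth node path depth
            = pvGoA calls_to max_depth path depth hd children [] := by
          rw [pvTravA, dif_neg (by omega)]
          simp [hm]
        simp only [List.map_cons, List.flatten_cons, pvG, htrav]
        by_cases hl : 1 < path.length <;> simp [hl]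
      | none =>
        have hstep : pvStep calls_to path depth node rest = rest := by
          simp only [pvStep, hm]
        have htrav : pvTravA calls_to max_depth node path depth = [] := by
          rw [pvTravA, dif_neg (by omega)]
          simp [hm]
        simp only [hstep, List.map_cons, List.flatten_cons, pvG, htrav]
        by_cases hl : 1 < path.length <;> simp [hl]
    · intro f hf
      cases hm : (PySem.Dict.mk calls_to).get? node with
      | some children =>
        simp only [pvStep, hm] at hf
        rw [pvPush_eq] at hf
        rcases List.mem_append.1 hf with hf | hf
        · rcases List.mem_map.1 hf with ⟨c, _, rfl⟩
          simp
        · exact hne f (List.mem_cons_of_mem _ hf)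
      | none =>
        simp only [pvStep, hm] at hf
        exact hne f (List.mem_cons_of_mem _ hf)
  | case3 chains node path depth rest hd ih =>
    rw [pvLoopB]
    simp only [dif_neg hd]
    simp only [dite_eq_ite] at ih
    rw [ih (fun f hf => hne f (List.mem_cons_of_mem _ hf))]
    have htrav : pvTravA calls_to max_depth node path depth = [] := by
      rw [pvTravA, dif_pos (by omega)]
    simp only [List.map_cons, List.flatten_cons, pvG, htrav]
    by_cases hl : 1 < path.length <;> simp [hl]

-- ===== VERDICT (by name: the statement is the Claim_ definition above) =====
theorem analyze_call_chains_spec : Claim_equal_analyze_call_chains := by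
  intro routine_name calls_to max_depth _
  unfold Spec_analyze_call_chains analyze_call_chains analyze_call_chains_alt
  rw [pvLoopB_eq]
  · simp [pvG]
  · intro f hf
    simp at hf
    subst hf
    simp
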